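-- pv_equiv track=rewrite | github.com/WendyVallejo24/Python | curso-python/working-externallibraries/Ejercicio3.py | blackjack_hand_greater_than
-- ===== SOURCE A (Python) =====
-- def blackjack_hand_greater_than(hand_1, hand_2):
--     """
--     Return True if hand_1 beats hand_2, and False otherwise.
--
--     In order for hand_1 to beat hand_2 the following must be true:
--     - The total of hand_1 must not exceed 21
--     - The total of hand_1 must exceed the total of hand_2 OR hand_2's total must exceed 21
--
--     Hands are represented as a list of cards. Each card is represented by a string.
--
--     When adding up a hand's total, cards with numbers count for that many points. Face
--     cards ('J', 'Q', and 'K') are worth 10 points. 'A' can count for 1 or 11.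
--
--     When determining a hand's total, you should try to count aces in the way that
--     maximizes the hand's total without going over 21. e.g. the total of ['A', 'A', '9'] is 21,
--     the total of ['A', 'A', '9', '3'] is 14.
--
--     Examples:
--     >>> blackjack_hand_greater_than(['K'], ['3', '4'])
--     True
--     >>> blackjack_hand_greater_than(['K'], ['10'])
--     False
--     >>> blackjack_hand_greater_than(['K', 'K', '2'], ['3'])
--     False
--     """
--     def get_num(string):
--         if string in ('J', 'Q', 'K'):
--             return 10
--         if string == 'A':
--             return 11
--         return int(string)
--
--     def get_hand_num(hand):
--         list_num = [get_num(x) for x in hand]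
--         num_aces = len([x for x in list_num if x >= 11])
--         total_sum = sum([x for x in list_num if x < 11])
--         total_sum = total_sum + num_aces
--         while total_sum + 10 <= 21 and num_aces > 0:
--             total_sum += 10
--             num_aces -= 1
--         return total_sum
--
--     suma_hand_1 = get_hand_num(hand_1)
--     suma_hand_2 = get_hand_num(hand_2)
--     return suma_hand_1 <= 21 and (suma_hand_1 > suma_hand_2 or suma_hand_2 > 21)
--
--     pass
-- ===== SOURCE B (Python) =====
-- def blackjack_hand_greater_than(hand_1, hand_2):
--     def value(card):
--         if card in ('J', 'Q', 'K'):
--             return 10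
--         if card == 'A':
--             return 11
--         return int(card)
--
--     def best_total(hand):
--         total = 0
--         aces = 0
--         for card in hand:
--             v = value(card)
--             if v >= 11:
--                 total += 11
--                 aces += 1
--             else:
--                 total += v
--         if total > 21 and aces > 0:
--             total -= 10 * min(aces, (total - 12) // 10)
--         return total
--
--     t1 = best_total(hand_1)
--     t2 = best_total(hand_2)
--     return t1 <= 21 and (t1 > t2 or t2 > 21)
-- ===== Notes on version B (the rewrite author's own statement) =====
-- stated objective: alternative
-- what changed: B makes a single pass accumulating (total, aces) with aces counted at 11, then demotes aces by a closed-form min(aces,(total-12)//10) subtraction instead of A's three list comprehensions plus an add-10-per-ace while loop.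
import Mathlib
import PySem

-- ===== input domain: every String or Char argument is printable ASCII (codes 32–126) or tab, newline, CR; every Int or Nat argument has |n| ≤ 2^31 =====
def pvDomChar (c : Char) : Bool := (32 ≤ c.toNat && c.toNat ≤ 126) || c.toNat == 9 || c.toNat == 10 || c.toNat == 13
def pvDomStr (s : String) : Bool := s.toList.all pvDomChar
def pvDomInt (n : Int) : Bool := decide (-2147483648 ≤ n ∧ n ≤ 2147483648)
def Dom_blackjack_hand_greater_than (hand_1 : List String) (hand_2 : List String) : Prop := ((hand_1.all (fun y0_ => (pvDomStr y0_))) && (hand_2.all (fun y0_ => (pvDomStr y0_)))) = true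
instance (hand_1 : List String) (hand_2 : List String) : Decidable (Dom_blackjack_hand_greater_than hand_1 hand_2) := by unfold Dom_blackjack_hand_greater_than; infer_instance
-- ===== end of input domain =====

-- B replaces A's three list comprehensions and add-10-per-ace while loop by one pass
-- accumulating (total, aces) with aces at 11 and a closed-form demotion; same results.

-- ===== PORT A =====
def pvGetNumA (s : String) : Int :=
  if s = "J" ∨ s = "Q" ∨ s = "K" then 10
  else if s = "A" then 11
  else (PySem.Int.ofStr? s).getD 0   -- int(string); Pre_ excludes the none (ValueError) case

-- the while loop of get_hand_num, recursing on num_aces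
def pvLoopA (total : Int) (aces : Nat) : Int :=
  match aces with
  | 0 => total
  | a + 1 => if total + 10 ≤ 21 then pvLoopA (total + 10) a else total

def pvHandNumA (hand : List String) : Int :=
  let list_num := hand.map pvGetNumA
  let num_aces := (list_num.filter (fun x => x ≥ 11)).length
  let total_sum := (list_num.filter (fun x => x < 11)).sum
  pvLoopA (total_sum + (num_aces : Int)) num_aces

def blackjack_hand_greater_than (hand_1 : List String) (hand_2 : List String) : Bool :=
  let suma_hand_1 := pvHandNumA hand_1
  let suma_hand_2 := pvHandNumA hand_2
  decide (suma_hand_1 ≤ 21 ∧ (suma_hand_1 > suma_hand_2 ∨ suma_hand_2 > 21))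

-- ===== PORT B =====
def pvValueB (s : String) : Int :=
  if s = "J" ∨ s = "Q" ∨ s = "K" then 10
  else if s = "A" then 11
  else (PySem.Int.ofStr? s).getD 0   -- int(card); Pre_ excludes the none (ValueError) case

def pvBestTotalB (hand : List String) : Int :=
  let p := hand.foldl
    (fun (st : Int × Int) card =>
      let v := pvValueB card
      if v ≥ 11 then (st.1 + 11, st.2 + 1) else (st.1 + v, st.2))
    (0, 0)
  if p.1 > 21 ∧ p.2 > 0 then p.1 - 10 * min p.2 ((p.1 - 12).fdiv 10) else p.1

def blackjack_hand_greater_than_alt (hand_1 : List String) (hand_2 : List String) : Bool :=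
  let t1 := pvBestTotalB hand_1
  let t2 := pvBestTotalB hand_2
  decide (t1 ≤ 21 ∧ (t1 > t2 ∨ t2 > 21))

-- ===== PRECONDITION & SPEC =====
-- Pre_ excludes exactly the hands containing a card that is none of 'J','Q','K','A'
-- and not parseable by int(), on which the Python A raises ValueError.
def Pre_blackjack_hand_greater_than (hand_1 : List String) (hand_2 : List String) : Prop :=
  ∀ s ∈ hand_1 ++ hand_2, s = "J" ∨ s = "Q" ∨ s = "K" ∨ s = "A" ∨ (PySem.Int.ofStr? s).isSome

instance (hand_1 : List String) (hand_2 : List String) : Decidable (Pre_blackjack_hand_greater_than hand_1 hand_2) := by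
  unfold Pre_blackjack_hand_greater_than; infer_instance

def pvWitness_blackjack_hand_greater_than : List String × List String := (["A", "10"], ["K", "5"])

def Spec_blackjack_hand_greater_than (hand_1 : List String) (hand_2 : List String) (out : Bool) : Prop := out = blackjack_hand_greater_than_alt hand_1 hand_2
instance (hand_1 : List String) (hand_2 : List String) (out : Bool) : Decidable (Spec_blackjack_hand_greater_than hand_1 hand_2 out) := by unfold Spec_blackjack_hand_greater_than; infer_instance

-- ===== CLAIM (what is proved, stated in full; the proofs are below) =====
def Claim_equal_blackjack_hand_greater_than : Prop := ∀ (hand_1 : List String) (hand_2 : List String), Dom_blackjack_hand_greater_than hand_1 hand_2 → Pre_blackjack_hand_greater_than hand_1 hand_2 → Spec_blackjack_hand_greater_than hand_1 hand_2 (blackjack_hand_greater_than hand_1 hand_2)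

-- ===== LEMMAS AND PROOFS =====

theorem pvValueB_eq_getNumA : pvValueB = pvGetNumA := rfl

-- fold invariant: starting from (t0, c0) the fold adds S + 11*a to the total and a to the aces,
-- where S is the sum of the sub-11 values and a the number of values ≥ 11.
theorem pvFoldB_eq (hand : List String) : ∀ (t0 c0 : Int),
    hand.foldl
      (fun (st : Int × Int) card =>
        let v := pvGetNumA card
        if v ≥ 11 then (st.1 + 11, st.2 + 1) else (st.1 + v, st.2))
      (t0, c0)
    = (t0 + ((hand.map pvGetNumA).filter (fun x => x < 11)).sum
          + 11 * (((hand.map pvGetNumA).filter (fun x => x ≥ 11)).length : Int),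
       c0 + (((hand.map pvGetNumA).filter (fun x => x ≥ 11)).length : Int)) := by
  induction hand with
  | nil => intro t0 c0; simp
  | cons hd tl ih =>
    intro t0 c0
    rw [List.foldl_cons]
    by_cases h : pvGetNumA hd ≥ 11
    · have h1 : ¬ pvGetNumA hd < 11 := by omega
      simp only [if_pos h]
      rw [ih]
      simp only [List.map_cons, List.filter_cons, decide_eq_true_eq,
        if_pos h, if_neg h1, List.length_cons]
      simp only [Prod.mk.injEq]
      constructor <;> push_cast <;> ring
    · have h1 : pvGetNumA hd < 11 := by omega
      simp only [if_neg h]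
      rw [ih]
      simp only [List.map_cons, List.filter_cons, decide_eq_true_eq,
        if_pos h1, if_neg h, List.sum_cons]
      simp only [Prod.mk.injEq]
      constructor <;> push_cast <;> ring

-- the while loop of A, started at t with a aces, equals B's closed-form demotion of T = t + 10*a
theorem pvLoopA_closed (a : Nat) : ∀ (t : Int),
    pvLoopA t a =
      (if t + 10 * (a : Int) > 21 ∧ (a : Int) > 0
       then t + 10 * (a : Int) - 10 * min (a : Int) ((t + 10 * (a : Int) - 12).fdiv 10)
       else t + 10 * (a : Int)) := by
  induction a with
  | zero => intro t; simp [pvLoopA]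
  | succ a ih =>
    intro t
    have hfd : ∀ x : Int, x.fdiv 10 = x / 10 := fun x => Int.fdiv_eq_ediv_of_nonneg x (by norm_num)
    rw [pvLoopA]
    by_cases h : t + 10 ≤ 21
    · rw [if_pos h, ih]
      rcases le_or_gt (t + 10 * ((a : Nat) + 1 : Int)) 21 with hle | hgt
      · rw [if_neg (by omega), if_neg (by omega)]
        push_cast
        ring
      · rw [if_pos (by push_cast; omega)]
        by_cases ha : (a : Int) > 0
        · rw [if_pos (by push_cast at hgt ⊢; omega)]
          have hm : min ((a : Int)) (((t + 10) + 10 * (a : Int) - 12).fdiv 10)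
               = min (((a : Nat) + 1 : Int)) ((t + 10 * (((a : Nat) : Int) + 1) - 12).fdiv 10) := by
            rw [hfd, hfd, Int.min_def, Int.min_def]
            split_ifs <;> push_cast at * <;> omega
          push_cast at hm ⊢
          omega
        · have ha0 : (a : Int) = 0 := by omega
          rw [if_neg (by omega)]
          have hm : min (((a : Nat) + 1 : Int)) ((t + 10 * (((a : Nat) : Int) + 1) - 12).fdiv 10) = 1 := by
            rw [hfd, Int.min_def]
            split_ifs <;> push_cast at * <;> omega
          push_cast at hm ⊢
          omega
    · rw [if_neg h, if_pos (by push_cast; omega)]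
      have hm : min (((a : Nat) + 1 : Int)) ((t + 10 * (((a : Nat) : Int) + 1) - 12).fdiv 10)
           = ((a : Nat) + 1 : Int) := by
        rw [hfd, Int.min_def]
        split_ifs <;> push_cast at * <;> omega
      push_cast at hm ⊢
      omega

theorem handNum_eq (hand : List String) : pvHandNumA hand = pvBestTotalB hand := by
  unfold pvHandNumA pvBestTotalB
  rw [pvValueB_eq_getNumA, pvFoldB_eq hand 0 0]
  set S := ((hand.map pvGetNumA).filter (fun x => x < 11)).sum with hS
  set a := ((hand.map pvGetNumA).filter (fun x => x ≥ 11)).length with ha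
  simp only [zero_add]
  rw [pvLoopA_closed a (S + (a : Int))]
  have hc : S + (a : Int) + 10 * (a : Int) = S + 11 * (a : Int) := by ring
  rw [hc]

-- ===== VERDICT (by name: the statement is the Claim_ definition above) =====
theorem blackjack_hand_greater_than_spec : Claim_equal_blackjack_hand_greater_than := by
  intro hand_1 hand_2 _ _
  unfold Spec_blackjack_hand_greater_than blackjack_hand_greater_than blackjack_hand_greater_than_alt
  rw [handNum_eq hand_1, handNum_eq hand_2]
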